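-- pv_equiv track=rewrite | github.com/kurt-lgtm/AppyHour | AppyHourMCP/tools/ops_summary_builder.py | _classify_fc_from_tags
-- ===== SOURCE A (Python) =====
-- def _classify_fc_from_tags(tags_str: str) -> str | None:
--     """Classify an order's FC from its standalone Shopify tags.
--
--     Looks for exact tags: RMFG, COG, GRIPCA (standalone, not prefixed).
--     Falls back to RMFG_*, COG_*, GRIPCA_* prefixed tags.
--     Returns the FC name or None if no match.
--     """
--     tags = [t.strip() for t in tags_str.split(",")]
--     # Check standalone FC tags first (most reliable)
--     for tag in tags:
--         tag_upper = tag.upper()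
--         if tag_upper == "RMFG":
--             return "RMFG"
--         if tag_upper == "COG":
--             return "COG"
--         if tag_upper == "GRIPCA":
--             return "GRIPCA"
--     # Fallback: prefixed tags
--     for tag in tags:
--         tag_upper = tag.upper()
--         if tag_upper.startswith("RMFG_") or tag_upper.startswith("RMFG-"):
--             return "RMFG"
--         if tag_upper.startswith("COG_") or tag_upper.startswith("COG-"):
--             return "COG"
--         if tag_upper.startswith("GRIPCA_") or tag_upper.startswith("GRIPCA-"):
--             return "GRIPCA"
--     return None
-- ===== SOURCE B (Python) =====
-- def _classify_fc_from_tags(tags_str: str) -> str | None: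
--     """Single pass: standalone match returns immediately; the first prefixed
--     match is recorded once in a fallback variable and returned after the loop."""
--     fallback = None
--     for raw in tags_str.split(","):
--         u = raw.strip().upper()
--         for fc in ("RMFG", "COG", "GRIPCA"):
--             if u == fc:
--                 return fc
--             if fallback is None and (u.startswith(fc + "_") or u.startswith(fc + "-")):
--                 fallback = fc
--     return fallback
-- ===== Notes on version B (the rewrite author's own statement) =====
-- stated objective: alternative
-- what changed: Replaced A's two sequential scans over the tag list (standalone pass, then prefixed pass) by a single pass that returns immediately on a standalone match and records the first prefixed match once in a fallback variable returned after the loop.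
import Mathlib
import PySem

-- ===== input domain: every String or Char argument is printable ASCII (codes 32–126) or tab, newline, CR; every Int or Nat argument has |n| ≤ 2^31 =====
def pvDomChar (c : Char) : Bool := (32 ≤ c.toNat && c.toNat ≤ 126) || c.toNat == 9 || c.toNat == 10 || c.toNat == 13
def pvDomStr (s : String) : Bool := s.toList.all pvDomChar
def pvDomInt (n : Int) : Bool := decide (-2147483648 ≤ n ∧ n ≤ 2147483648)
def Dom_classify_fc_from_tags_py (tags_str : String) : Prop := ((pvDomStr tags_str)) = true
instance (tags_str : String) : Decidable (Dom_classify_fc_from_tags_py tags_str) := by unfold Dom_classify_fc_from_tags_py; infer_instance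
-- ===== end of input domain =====

-- B replaces A's two sequential scans by one pass with a set-once fallback variable (alternative decomposition, same cost).
-- String operations are ported on the List Char side (PySem.Chars), exact for the stated ASCII domain.

-- ===== PORT A =====
-- first loop of A: standalone FC tags
def pvA_standalone : List (List Char) → Option String
  | [] => none
  | tag :: rest =>
    let u := PySem.Chars.upper tag
    if u = "RMFG".toList then some "RMFG"
    else if u = "COG".toList then some "COG"
    else if u = "GRIPCA".toList then some "GRIPCA"
    else pvA_standalone rest

-- second loop of A: prefixed FC tags
def pvA_prefixed : List (List Char) → Option String
  | [] => none
  | tag :: rest =>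
    let u := PySem.Chars.upper tag
    if PySem.Chars.startswith u "RMFG_".toList || PySem.Chars.startswith u "RMFG-".toList then some "RMFG"
    else if PySem.Chars.startswith u "COG_".toList || PySem.Chars.startswith u "COG-".toList then some "COG"
    else if PySem.Chars.startswith u "GRIPCA_".toList || PySem.Chars.startswith u "GRIPCA-".toList then some "GRIPCA"
    else pvA_prefixed rest

def classify_fc_from_tags_py (tags_str : String) : Option String :=
  let tags := (PySem.Chars.splitOn tags_str.toList [',']).map PySem.Chars.strip
  match pvA_standalone tags with
  | some r => some r
  | none => pvA_prefixed tags

-- ===== PORT B =====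
def pvB_fcs : List (List Char) := ["RMFG".toList, "COG".toList, "GRIPCA".toList]

-- B's inner loop over the three FC names: .inl r = early return, .inr fb = updated fallback
def pvB_tag (u : List Char) : List (List Char) → Option String → (Option String) ⊕ (Option String)
  | [], fb => .inr fb
  | fc :: rest, fb =>
    if u = fc then .inl (some (String.ofList fc))
    else
      let fb' := if fb.isNone && (PySem.Chars.startswith u (fc ++ ['_']) || PySem.Chars.startswith u (fc ++ ['-']))
                 then some (String.ofList fc) else fb
      pvB_tag u rest fb'

-- B's single outer loop over the raw comma-separated pieces
def pvB_loop : List (List Char) → Option String → Option String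
  | [], fb => fb
  | raw :: rest, fb =>
    let u := PySem.Chars.upper (PySem.Chars.strip raw)
    match pvB_tag u pvB_fcs fb with
    | .inl r => r
    | .inr fb' => pvB_loop rest fb'

def classify_fc_from_tags_py_alt (tags_str : String) : Option String :=
  pvB_loop (PySem.Chars.splitOn tags_str.toList [',']) none

-- ===== PRECONDITION & SPEC =====
def Spec_classify_fc_from_tags_py (tags_str : String) (out : Option String) : Prop := out = classify_fc_from_tags_py_alt tags_str
instance (tags_str : String) (out : Option String) : Decidable (Spec_classify_fc_from_tags_py tags_str out) := by unfold Spec_classify_fc_from_tags_py; infer_instance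

-- ===== CLAIM (what is proved, stated in full; the proofs are below) =====
def Claim_equal_classify_fc_from_tags_py : Prop := ∀ (tags_str : String), Dom_classify_fc_from_tags_py tags_str → Spec_classify_fc_from_tags_py tags_str (classify_fc_from_tags_py tags_str)

-- ===== LEMMAS AND PROOFS =====
-- Loop invariant: B's single pass equals A's standalone scan, falling back to the
-- recorded value, falling back to A's prefixed scan.
theorem pvB_loop_eq (raws : List (List Char)) (fb : Option String) :
    pvB_loop raws fb =
      (match pvA_standalone (raws.map PySem.Chars.strip) with
       | some r => some r
       | none =>
         match fb with
         | some x => some x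
         | none => pvA_prefixed (raws.map PySem.Chars.strip)) := by
  induction raws generalizing fb with
  | nil => cases fb <;> simp [pvB_loop, pvA_standalone, pvA_prefixed]
  | cons raw rest ih =>
    simp only [pvB_loop, pvB_fcs, pvB_tag, List.map_cons, pvA_standalone, pvA_prefixed]
    have h1 : "RMFG".toList ++ ['_'] = "RMFG_".toList := rfl
    have h2 : "RMFG".toList ++ ['-'] = "RMFG-".toList := rfl
    have h3 : "COG".toList ++ ['_'] = "COG_".toList := rfl
    have h4 : "COG".toList ++ ['-'] = "COG-".toList := rfl
    have h5 : "GRIPCA".toList ++ ['_'] = "GRIPCA_".toList := rfl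
    have h6 : "GRIPCA".toList ++ ['-'] = "GRIPCA-".toList := rfl
    have hr : String.ofList "RMFG".toList = "RMFG" := rfl
    have hc : String.ofList "COG".toList = "COG" := rfl
    have hg : String.ofList "GRIPCA".toList = "GRIPCA" := rfl
    rw [h1, h2, h3, h4, h5, h6, hr, hc, hg]
    cases fb <;> split_ifs <;> simp_all

-- ===== VERDICT (by name: the statement is the Claim_ definition above) =====
theorem classify_fc_from_tags_py_spec : Claim_equal_classify_fc_from_tags_py := by
  intro tags_str _
  unfold Spec_classify_fc_from_tags_py classify_fc_from_tags_py classify_fc_from_tags_py_alt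
  rw [pvB_loop_eq]
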